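-- pv_equiv track=rewrite | github.com/Lyce24/RubiksCube-TwophaseSolver | entropy.py | convert_sol_to_move
-- ===== SOURCE A (Python) =====
-- def convert_sol_to_move(s):
--     move_list = s.split(' ')[:-1]
--     ret_list = []
--     for i in move_list:
--         if i == 'U1':
--             ret_list.append(0)
--         elif i == 'U2':
--             ret_list.append(1)
--         elif i == "U3":
--             ret_list.append(2)
--         elif i == 'R1':
--             ret_list.append(3)
--         elif i == 'R2':
--             ret_list.append(4)
--         elif i == "R3":
--             ret_list.append(5)
--         elif i == 'F1':
--             ret_list.append(6)
--         elif i == 'F2':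
--             ret_list.append(7)
--         elif i == "F3":
--             ret_list.append(8)
--         elif i == 'D1':
--             ret_list.append(9)
--         elif i == 'D2':
--             ret_list.append(10)
--         elif i == "D3":
--             ret_list.append(11)
--         elif i == 'L1':
--             ret_list.append(12)
--         elif i == 'L2':
--             ret_list.append(13)
--         elif i == "L3":
--             ret_list.append(14)
--         elif i == 'B1':
--             ret_list.append(15)
--         elif i == 'B2':
--             ret_list.append(16)
--         elif i == "B3":
--             ret_list.append(17)
--     return ret_list
-- ===== SOURCE B (Python) =====
-- FACES = 'URFDLB'
--
-- def convert_sol_to_move(s):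
--     codes = []
--     for t in s.split(' ')[:-1]:
--         if len(t) == 2 and t[0] in FACES and t[1] in '123':
--             codes.append(FACES.index(t[0]) * 3 + int(t[1]) - 1)
--     return codes
-- ===== Notes on version B (the rewrite author's own statement) =====
-- stated objective: simpler
-- what changed: The 18-branch elif chain per token is replaced by a positional arithmetic decode: a token is accepted iff it is a face letter (one of U,R,F,D,L,B) followed by a digit 1-3, and its code is face_index*3 + digit - 1.
import Mathlib
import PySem

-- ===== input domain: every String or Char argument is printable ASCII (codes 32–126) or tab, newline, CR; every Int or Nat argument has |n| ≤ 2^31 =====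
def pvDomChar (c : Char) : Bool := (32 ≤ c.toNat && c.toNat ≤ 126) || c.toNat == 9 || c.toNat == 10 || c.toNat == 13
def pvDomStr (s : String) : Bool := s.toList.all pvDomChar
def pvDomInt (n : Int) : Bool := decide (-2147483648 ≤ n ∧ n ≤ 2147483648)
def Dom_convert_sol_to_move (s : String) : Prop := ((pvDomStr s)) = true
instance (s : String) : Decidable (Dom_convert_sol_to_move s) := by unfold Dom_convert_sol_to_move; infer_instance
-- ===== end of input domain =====

-- B replaces A's 18-branch elif chain by an arithmetic decode ('URFDLB'.index(t[0])*3 + int(t[1]) - 1) guarded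
-- by a shape check, keeping A's silent skip of unrecognized tokens (objective: simpler).

-- ===== PORT A =====
def convert_sol_to_move (s : String) : List Int :=
  let move_list := PySem.List.slice ((PySem.Str.split? s " ").getD []) none (some (-1))
  move_list.foldl (fun ret_list i =>
    if i = "U1" then ret_list ++ [(0 : Int)]
    else if i = "U2" then ret_list ++ [1]
    else if i = "U3" then ret_list ++ [2]
    else if i = "R1" then ret_list ++ [3]
    else if i = "R2" then ret_list ++ [4]
    else if i = "R3" then ret_list ++ [5]
    else if i = "F1" then ret_list ++ [6]
    else if i = "F2" then ret_list ++ [7]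
    else if i = "F3" then ret_list ++ [8]
    else if i = "D1" then ret_list ++ [9]
    else if i = "D2" then ret_list ++ [10]
    else if i = "D3" then ret_list ++ [11]
    else if i = "L1" then ret_list ++ [12]
    else if i = "L2" then ret_list ++ [13]
    else if i = "L3" then ret_list ++ [14]
    else if i = "B1" then ret_list ++ [15]
    else if i = "B2" then ret_list ++ [16]
    else if i = "B3" then ret_list ++ [17]
    else ret_list) []

-- ===== PORT B =====
-- FACES = 'URFDLB'
def pvFaces : String := "URFDLB"

-- Python's short-circuit 'len(t)==2 and t[0] in FACES and t[1] in "123"' is ported as nested ifs;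
-- the 'none' match arms are unreachable under the length guard (they only make the port total).
def convert_sol_to_move_alt (s : String) : List Int :=
  (PySem.List.slice ((PySem.Str.split? s " ").getD []) none (some (-1))).foldl
    (fun codes t =>
      if PySem.Str.len t = 2 then
        match PySem.Str.pyGet? t 0 with
        | some c0 =>
          if PySem.Str.isIn (String.ofList [c0]) pvFaces = true then
            match PySem.Str.pyGet? t 1 with
            | some c1 =>
              if PySem.Str.isIn (String.ofList [c1]) "123" = true then
                codes ++ [PySem.Str.find pvFaces (String.ofList [c0]) * 3
                          + (PySem.Int.ofStr? (String.ofList [c1])).getD 0 - 1]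
              else codes
            | none => codes
          else codes
        | none => codes
      else codes) []

-- ===== PRECONDITION & SPEC =====
def Spec_convert_sol_to_move (s : String) (out : List Int) : Prop := out = convert_sol_to_move_alt s
instance (s : String) (out : List Int) : Decidable (Spec_convert_sol_to_move s out) := by unfold Spec_convert_sol_to_move; infer_instance

-- ===== CLAIM (what is proved, stated in full; the proofs are below) =====
def Claim_equal_convert_sol_to_move : Prop := ∀ (s : String), Dom_convert_sol_to_move s → Spec_convert_sol_to_move s (convert_sol_to_move s)

-- ===== LEMMAS AND PROOFS =====

-- the two loop bodies agree on every token (both silently skip non-move tokens)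
set_option maxHeartbeats 1000000 in
theorem pv_step_eq (acc : List Int) (t : String) :
    (if t = "U1" then acc ++ [(0 : Int)]
    else if t = "U2" then acc ++ [1]
    else if t = "U3" then acc ++ [2]
    else if t = "R1" then acc ++ [3]
    else if t = "R2" then acc ++ [4]
    else if t = "R3" then acc ++ [5]
    else if t = "F1" then acc ++ [6]
    else if t = "F2" then acc ++ [7]
    else if t = "F3" then acc ++ [8]
    else if t = "D1" then acc ++ [9]
    else if t = "D2" then acc ++ [10]
    else if t = "D3" then acc ++ [11]
    else if t = "L1" then acc ++ [12]
    else if t = "L2" then acc ++ [13]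
    else if t = "L3" then acc ++ [14]
    else if t = "B1" then acc ++ [15]
    else if t = "B2" then acc ++ [16]
    else if t = "B3" then acc ++ [17]
    else acc)
    =
    (if PySem.Str.len t = 2 then
        match PySem.Str.pyGet? t 0 with
        | some c0 =>
          if PySem.Str.isIn (String.ofList [c0]) pvFaces = true then
            match PySem.Str.pyGet? t 1 with
            | some c1 =>
              if PySem.Str.isIn (String.ofList [c1]) "123" = true then
                acc ++ [PySem.Str.find pvFaces (String.ofList [c0]) * 3
                          + (PySem.Int.ofStr? (String.ofList [c1])).getD 0 - 1]
              else acc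
            | none => acc
          else acc
        | none => acc
      else acc) := by
  have hlen : PySem.Str.len t = (t.toList.length : Int) := by simp
  have hget0 : PySem.Str.pyGet? t 0 = t.toList[(0:Nat)]? := by
    simpa using PySem.Str.pyGet?_natCast t 0
  have hget1 : PySem.Str.pyGet? t 1 = t.toList[(1:Nat)]? := by
    simpa using PySem.Str.pyGet?_natCast t 1
  have heq : ∀ u : String, (t = u) = (t.toList = u.toList) := by
    intro u; rw [eq_iff_iff]; exact String.toList_inj.symm
  rw [hlen, hget0, hget1]
  simp only [heq]
  generalize t.toList = l
  match l with
  | [] => simp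
  | [a] => simp
  | a :: b :: c :: r => simp; intro h; omega
  | [a, b] =>
    simp only [List.length_cons, List.length_nil]
    norm_num
    by_cases ha : a ∈ (['U','R','F','D','L','B'] : List Char)
    · rcases (show a = 'U' ∨ a = 'R' ∨ a = 'F' ∨ a = 'D' ∨ a = 'L' ∨ a = 'B' by
          simpa using ha) with rfl | rfl | rfl | rfl | rfl | rfl <;>
      · by_cases hb : b ∈ (['1','2','3'] : List Char)
        · rcases (show b = '1' ∨ b = '2' ∨ b = '3' by simpa using hb) with rfl | rfl | rfl <;> rfl
        · simp only [List.mem_cons, List.not_mem_nil, or_false, not_or] at hb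
          obtain ⟨g1, g2, g3⟩ := hb
          have hf : PySem.Chars.isIn [b] ['1','2','3'] = false := by
            rw [PySem.Chars.isIn_eq_false_iff]
            intro h
            have := (List.singleton_infix_iff b _).mp h
            simp [g1, g2, g3] at this
          simp [hf, g1, g2, g3]
    · simp only [List.mem_cons, List.not_mem_nil, or_false, not_or] at ha
      obtain ⟨h1, h2, h3, h4, h5, h6⟩ := ha
      have hf : PySem.Chars.isIn [a] pvFaces.toList = false := by
        rw [PySem.Chars.isIn_eq_false_iff]
        intro h
        have := (List.singleton_infix_iff a _).mp h
        simp [pvFaces, h1, h2, h3, h4, h5, h6] at this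
      simp [hf, h1, h2, h3, h4, h5, h6]

-- ===== VERDICT (by name: the statement is the Claim_ definition above) =====
theorem convert_sol_to_move_spec : Claim_equal_convert_sol_to_move := by
  intro s _
  unfold Spec_convert_sol_to_move convert_sol_to_move convert_sol_to_move_alt
  exact congrFun (congrFun (congrArg List.foldl (funext fun acc => funext fun t => pv_step_eq acc t)) []) _
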